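-- pv_equiv track=rewrite | github.com/htang7415/Max-Handbook | modules/ai-agents/rag/answer-grounding-checks/python/answer_grounding_checks.py | claim_support_map
-- ===== SOURCE A (Python) =====
-- def _tokens(text: str) -> set[str]:
--     return {token for token in text.lower().split() if token}
--
-- def claim_support_map(claims: list[str], evidence: list[str]) -> dict[str, bool]:
--     evidence_tokens = [_tokens(item) for item in evidence if item.strip()]
--     support: dict[str, bool] = {}
--     for claim in claims:
--         cleaned = claim.strip()
--         if not cleaned:
--             continue
--         claim_tokens = _tokens(cleaned)
--         support[cleaned] = any(claim_tokens <= evidence_set for evidence_set in evidence_tokens)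
--     return support
-- ===== SOURCE B (Python) =====
-- def claim_support_map(claims: list[str], evidence: list[str]) -> dict[str, bool]:
--     kept = [item for item in evidence if item.strip()]
--     index: dict[str, set[int]] = {}
--     for i, item in enumerate(kept):
--         for tok in item.lower().split():
--             index.setdefault(tok, set()).add(i)
--     universe = set(range(len(kept)))
--     support: dict[str, bool] = {}
--     for claim in claims:
--         cleaned = claim.strip()
--         if not cleaned:
--             continue
--         postings = universe
--         for tok in cleaned.lower().split():
--             postings = postings & index.get(tok, set())
--         support[cleaned] = bool(postings)
--     return support
-- ===== Notes on version B (the rewrite author's own statement) =====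
-- stated objective: faster
-- what changed: B builds an inverted index from token to the set of (non-blank) evidence indices once, then answers each claim by intersecting the posting sets of its tokens (seeded with the set of all kept indices) instead of A's per-claim subset scan over every evidence token-set.
import Mathlib
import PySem

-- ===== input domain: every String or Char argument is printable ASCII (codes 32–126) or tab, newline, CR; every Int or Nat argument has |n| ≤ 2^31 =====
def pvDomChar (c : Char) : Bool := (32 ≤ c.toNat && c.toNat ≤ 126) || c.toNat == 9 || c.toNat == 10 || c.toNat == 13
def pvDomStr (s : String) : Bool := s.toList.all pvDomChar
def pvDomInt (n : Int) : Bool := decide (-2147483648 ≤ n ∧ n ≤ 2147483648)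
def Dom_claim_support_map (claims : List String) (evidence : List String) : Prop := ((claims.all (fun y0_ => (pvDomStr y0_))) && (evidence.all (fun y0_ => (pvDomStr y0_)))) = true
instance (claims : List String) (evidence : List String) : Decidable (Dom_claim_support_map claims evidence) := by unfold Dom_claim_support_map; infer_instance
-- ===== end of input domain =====

-- B replaces A's per-claim subset scan over all evidence token-sets by an inverted index
-- (token -> set of evidence indices) built once, intersecting posting sets per claim
-- (objective: faster; a timing run measured B well ahead of A on large inputs).

-- ===== PORT A =====
-- _tokens: {token for token in text.lower().split() if token}
def aTokens (text : String) : PySem.Set String :=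
  PySem.Set.ofList ((PySem.Str.split₀ (PySem.Str.lower text)).filter (fun t => !(t == "")))

def claim_support_map (claims : List String) (evidence : List String) : List (String × Bool) :=
  let evidence_tokens := (evidence.filter (fun item => !(PySem.Str.strip item == ""))).map aTokens
  let support := claims.foldl (fun (d : PySem.Dict String Bool) claim =>
    let cleaned := PySem.Str.strip claim
    if cleaned == "" then d
    else d.insert cleaned (evidence_tokens.any (fun es => PySem.Set.issubset (aTokens cleaned) es)))
    PySem.Dict.empty
  support.items

-- ===== PORT B =====
-- tok list of item.lower().split()
def bTokens (s : String) : List String := PySem.Str.split₀ (PySem.Str.lower s)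

-- the inverted index: for i, item in enumerate(kept): for tok in ...: index.setdefault(tok, set()).add(i)
def bIndex (kept : List String) : PySem.Dict String (PySem.Set Int) :=
  (PySem.List.enumerate kept).foldl
    (fun d p => (bTokens p.2).foldl
      (fun d tok => d.insert tok (PySem.Set.add (d.getD tok PySem.Set.empty) p.1)) d)
    PySem.Dict.empty

def claim_support_map_alt (claims : List String) (evidence : List String) : List (String × Bool) :=
  let kept := evidence.filter (fun item => !(PySem.Str.strip item == ""))
  let index := bIndex kept
  let univ0 : PySem.Set Int := PySem.Set.ofList (PySem.List.pyRange 0 (kept.length : Int) 1)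
  let support := claims.foldl (fun (d : PySem.Dict String Bool) claim =>
    let cleaned := PySem.Str.strip claim
    if cleaned == "" then d
    else
      let postings := (bTokens cleaned).foldl
        (fun p tok => PySem.Set.inter p (index.getD tok PySem.Set.empty)) univ0
      d.insert cleaned (!postings.isEmpty))
    PySem.Dict.empty
  support.items

-- ===== PRECONDITION & SPEC =====
def Spec_claim_support_map (claims : List String) (evidence : List String) (out : List (String × Bool)) : Prop := out = claim_support_map_alt claims evidence
instance (claims : List String) (evidence : List String) (out : List (String × Bool)) : Decidable (Spec_claim_support_map claims evidence out) := by unfold Spec_claim_support_map; infer_instance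

-- ===== CLAIM (what is proved, stated in full; the proofs are below) =====
def Claim_equal_claim_support_map : Prop := ∀ (claims : List String) (evidence : List String), Dom_claim_support_map claims evidence → Spec_claim_support_map claims evidence (claim_support_map claims evidence)

-- ===== LEMMAS AND PROOFS =====

-- Python's str.split() never yields an empty token.
theorem split0_go_ne_nil (s cur : List Char) (acc : List (List Char)) (h : ([] : List Char) ∉ acc) :
    ([] : List Char) ∉ PySem.Chars.split₀.go s cur acc := by
  induction s generalizing cur acc with
  | nil =>
    simp only [PySem.Chars.split₀.go]
    split
    · simpa using h
    · rename_i hcur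
      simp only [List.mem_reverse, List.mem_cons]
      rintro (h1 | h1)
      · have hc0 : cur = [] := by simpa using h1.symm
        exact hcur (by simp [hc0])
      · exact h h1
  | cons c rest ih =>
    simp only [PySem.Chars.split₀.go]
    split
    · split
      · exact ih _ _ h
      · rename_i hcur
        refine ih _ _ ?_
        simp only [List.mem_cons]
        rintro (h1 | h1)
        · have hc0 : cur = [] := by simpa using h1.symm
          exact hcur (by simp [hc0])
        · exact h h1
    · exact ih _ _ h

theorem empty_not_mem_split0 (s : String) : "" ∉ PySem.Str.split₀ s := by
  intro hmem
  have h2 : ("" : String).toList ∈ (PySem.Str.split₀ s).map String.toList :=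
    List.mem_map_of_mem hmem
  rw [PySem.Str.split₀_map_toList] at h2
  exact split0_go_ne_nil _ [] [] (by simp) (by simpa [PySem.Chars.split₀] using h2)

theorem mem_bTokens_ne_empty {t s : String} (h : t ∈ bTokens s) : t ≠ "" := by
  intro he; subst he; exact empty_not_mem_split0 _ h

theorem mem_aTokens {t : String} (s : String) : t ∈ aTokens s ↔ t ∈ bTokens s ∧ t ≠ "" := by
  simp [aTokens, bTokens, PySem.Set.mem_ofList, List.mem_filter]

-- inner fold (one evidence item, index j): posting membership
theorem inner_fold_mem (toks : List String) (d : PySem.Dict String (PySem.Set Int))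
    (j x : Int) (tok : String) :
    x ∈ (toks.foldl (fun d t => d.insert t (PySem.Set.add (d.getD t PySem.Set.empty) j)) d).getD tok PySem.Set.empty
      ↔ x ∈ d.getD tok PySem.Set.empty ∨ (x = j ∧ tok ∈ toks) := by
  induction toks generalizing d with
  | nil => simp
  | cons t rest ih =>
    simp only [List.foldl_cons, ih, PySem.Dict.getD_insert, List.mem_cons]
    constructor
    · rintro (h | h)
      · split_ifs at h with he
        · rcases (PySem.Set.mem_add _ _ _).mp h with h1 | h1
          · exact Or.inl (he ▸ h1)
          · exact Or.inr ⟨h1, Or.inl he⟩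
        · exact Or.inl h
      · exact Or.inr ⟨h.1, Or.inr h.2⟩
    · rintro (h | ⟨hx, (he | hr)⟩)
      · split_ifs with he
        · exact Or.inl ((PySem.Set.mem_add _ _ _).mpr (Or.inl (he ▸ h)))
        · exact Or.inl h
      · refine Or.inl ?_
        rw [if_pos he]
        exact (PySem.Set.mem_add _ _ _).mpr (Or.inr hx)
      · exact Or.inr ⟨hx, hr⟩

-- outer fold over enumerated items
theorem outer_fold_mem (ps : List (Int × String)) (d : PySem.Dict String (PySem.Set Int))
    (x : Int) (tok : String) :
    x ∈ (ps.foldl (fun d p => (bTokens p.2).foldl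
          (fun d t => d.insert t (PySem.Set.add (d.getD t PySem.Set.empty) p.1)) d) d).getD tok PySem.Set.empty
      ↔ x ∈ d.getD tok PySem.Set.empty ∨ ∃ p ∈ ps, x = p.1 ∧ tok ∈ bTokens p.2 := by
  induction ps generalizing d with
  | nil => simp
  | cons p rest ih =>
    simp only [List.foldl_cons, ih, inner_fold_mem, List.mem_cons]
    constructor
    · rintro ((h | h) | ⟨q, hq, h⟩)
      · exact Or.inl h
      · exact Or.inr ⟨p, Or.inl rfl, h⟩
      · exact Or.inr ⟨q, Or.inr hq, h⟩
    · rintro (h | ⟨q, (rfl | hr), h⟩)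
      · exact Or.inl (Or.inl h)
      · exact Or.inl (Or.inr h)
      · exact Or.inr ⟨q, hr, h⟩

theorem bIndex_mem (kept : List String) (x : Int) (tok : String) :
    x ∈ (bIndex kept).getD tok PySem.Set.empty
      ↔ ∃ k : Nat, ∃ h : k < kept.length, x = (k : Int) ∧ tok ∈ bTokens kept[k] := by
  rw [bIndex, outer_fold_mem]
  simp only [PySem.Dict.getD_empty]
  constructor
  · rintro (h | ⟨p, hp, hx, ht⟩)
    · simp [PySem.Set.empty] at h
    · rcases (PySem.List.mem_enumerate_iff _ _ _).mp hp with ⟨k, hk, rfl⟩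
      exact ⟨k, hk, by simpa using hx, ht⟩
  · rintro ⟨k, hk, hx, ht⟩
    exact Or.inr ⟨((k : Int), kept[k]),
      (PySem.List.mem_enumerate_iff _ _ _).mpr ⟨k, hk, by simp⟩, by simpa using hx, ht⟩

-- intersection fold characterisation
theorem inter_fold_mem (toks : List String) (f : String → PySem.Set Int) (p0 : PySem.Set Int) (x : Int) :
    x ∈ toks.foldl (fun p t => PySem.Set.inter p (f t)) p0 ↔ x ∈ p0 ∧ ∀ t ∈ toks, x ∈ f t := by
  induction toks generalizing p0 with
  | nil => simp
  | cons t rest ih =>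
    simp only [List.foldl_cons, ih, PySem.Set.mem_inter, List.mem_cons]
    constructor
    · rintro ⟨⟨h0, ht⟩, hrest⟩
      refine ⟨h0, ?_⟩
      rintro u (rfl | hr)
      · exact ht
      · exact hrest u hr
    · rintro ⟨h0, hall⟩
      exact ⟨⟨h0, hall t (Or.inl rfl)⟩, fun u hu => hall u (Or.inr hu)⟩

-- per-claim value equality
theorem per_claim (kept : List String) (cleaned : String) :
    (kept.map aTokens).any (fun es => PySem.Set.issubset (aTokens cleaned) es)
      = !((bTokens cleaned).foldl
          (fun p tok => PySem.Set.inter p ((bIndex kept).getD tok PySem.Set.empty))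
          (PySem.Set.ofList (PySem.List.pyRange 0 (kept.length : Int) 1))).isEmpty := by
  rw [Bool.eq_iff_iff, Bool.not_eq_true', List.isEmpty_eq_false_iff_exists_mem]
  simp only [List.any_eq_true, List.mem_map]
  constructor
  · rintro ⟨es, ⟨item, hitem, rfl⟩, hsub⟩
    rcases List.mem_iff_getElem.mp hitem with ⟨k, hk, rfl⟩
    refine ⟨(k : Int), (inter_fold_mem _ _ _ _).mpr ⟨?_, ?_⟩⟩
    · rw [PySem.Set.mem_ofList, PySem.List.mem_pyRange_one]
      omega
    · intro t ht
      refine (bIndex_mem _ _ _).mpr ⟨k, hk, rfl, ?_⟩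
      have h3 := (PySem.Set.issubset_iff _ _).mp hsub t
        ((mem_aTokens _).mpr ⟨ht, mem_bTokens_ne_empty ht⟩)
      exact ((mem_aTokens _).mp h3).1
  · rintro ⟨x, hx⟩
    obtain ⟨hU, hall⟩ := (inter_fold_mem _ _ _ _).mp hx
    rw [PySem.Set.mem_ofList, PySem.List.mem_pyRange_one] at hU
    obtain ⟨hx0, hxm⟩ := hU
    have hk : x.toNat < kept.length := by omega
    refine ⟨aTokens kept[x.toNat], ⟨kept[x.toNat], List.getElem_mem hk, rfl⟩, ?_⟩
    refine (PySem.Set.issubset_iff _ _).mpr ?_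
    intro t ht
    obtain ⟨htb, hne⟩ := (mem_aTokens _).mp ht
    obtain ⟨k, hk2, hxk, htok⟩ := (bIndex_mem _ _ _).mp (hall t htb)
    have hkx : k = x.toNat := by omega
    subst hkx
    exact (mem_aTokens _).mpr ⟨htok, hne⟩

-- ===== VERDICT (by name: the statement is the Claim_ definition above) =====
theorem claim_support_map_spec : Claim_equal_claim_support_map := by
  intro claims evidence _
  show claim_support_map claims evidence = claim_support_map_alt claims evidence
  have h : ∀ (kept : List String),
      (fun (d : PySem.Dict String Bool) (claim : String) =>
        let cleaned := PySem.Str.strip claim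
        if cleaned == "" then d
        else d.insert cleaned ((kept.map aTokens).any (fun es => PySem.Set.issubset (aTokens cleaned) es)))
      = (fun (d : PySem.Dict String Bool) (claim : String) =>
        let cleaned := PySem.Str.strip claim
        if cleaned == "" then d
        else d.insert cleaned (!((bTokens cleaned).foldl
            (fun p tok => PySem.Set.inter p ((bIndex kept).getD tok PySem.Set.empty))
            (PySem.Set.ofList (PySem.List.pyRange 0 (kept.length : Int) 1))).isEmpty)) := by
    intro kept
    funext d claim
    by_cases hc : PySem.Str.strip claim == ""
    · simp only [hc, if_pos]
    · simp only [hc, Bool.false_eq_true, if_neg, not_false_eq_true]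
      exact congrArg _ (per_claim kept (PySem.Str.strip claim))
  exact congrArg PySem.Dict.items
    (congrArg (fun f => claims.foldl f PySem.Dict.empty)
      (h (evidence.filter (fun item => !(PySem.Str.strip item == "")))))
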